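-- pv_equiv track=rewrite | github.com/pypi-data/pypi-mirror-126 | packages/sbmlxdf/sbmlxdf-0.2.5-py3-none-any.whl/sbmlxdf/misc.py | extract_records
-- ===== SOURCE A (Python) =====
-- def extract_records(s):
--     """Split string of records into individual records.
--
--     Each record consists of comma separated key-value pairs.
--     E.g. record1: 'key1=val1, key2=val2, ...'.
--     Values may contain nested records (key=[record_x, record_y, ...]).
--
--     Example: 'record1; record2; ...' is converted to [record1, record2, ...]
--
--     see also: :func:`extract_params` and :func:`extract_lo_records`
--
--     :param s: records separated by ";"
--     :type s: str
--     :returns: elements contain individual records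
--     :rtype: list of str
--     """
--     records = []
--     brackets = 0
--     pos = 0
--     while pos < len(s):
--         for i in range(pos, len(s)):
--             if s[i] == '[':
--                 brackets += 1
--             if s[i] == ']':
--                 brackets -= 1
--             if s[i] == ';' and brackets == 0:
--                 break
--         if s[i] != ';':
--             i += 1
--         records.append(s[pos:i].strip())
--         pos = i+1
--     return records
-- ===== SOURCE B (Python) =====
-- def extract_records(s):
--     """Split string of records into individual records.
--
--     One flat pass: a bracket counter tracks nesting, the current record
--     is collected in a buffer and flushed at each top-level ';' and once
--     at the end (if non-empty).
--     """
--     records = []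
--     brackets = 0
--     cur = []
--     for ch in s:
--         if ch == '[':
--             brackets += 1
--         elif ch == ']':
--             brackets -= 1
--         elif ch == ';' and brackets == 0:
--             records.append(''.join(cur).strip())
--             cur = []
--             continue
--         cur.append(ch)
--     if cur:
--         records.append(''.join(cur).strip())
--     return records
-- ===== Notes on version B (the rewrite author's own statement) =====
-- stated objective: simpler
-- what changed: Replaces A's nested while/for-with-break index scanning and slicing by one flat pass with a running bracket counter and a current-record buffer flushed at top-level ';' and at the end.
-- intended difference: On strings ending in a semicolon at nonzero bracket depth A silently drops that final semicolon from the last record (an artefact of its post-loop index bump), while B keeps it, which is the natural flush of the remaining text. — e.g. on extract_records("[a;"): A returns ["[a"], B returns ["[a;"]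
import Mathlib
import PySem

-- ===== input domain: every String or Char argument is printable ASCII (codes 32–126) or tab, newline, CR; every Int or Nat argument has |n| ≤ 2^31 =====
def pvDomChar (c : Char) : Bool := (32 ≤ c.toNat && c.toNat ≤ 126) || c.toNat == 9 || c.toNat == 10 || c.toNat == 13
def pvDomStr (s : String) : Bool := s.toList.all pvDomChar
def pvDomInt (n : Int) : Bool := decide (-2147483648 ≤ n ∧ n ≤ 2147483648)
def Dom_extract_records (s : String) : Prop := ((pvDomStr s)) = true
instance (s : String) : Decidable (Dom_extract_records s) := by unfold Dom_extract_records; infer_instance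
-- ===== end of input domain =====

-- B replaces A's nested while/for-with-break scanning by one flat pass with a record buffer
-- (same O(n) cost, simpler); on strings ending in a ';' inside unmatched brackets A drops that
-- final ';' while B keeps it (stated as D_ below).

-- ===== PORT A =====
-- the two bracket-update ifs "if s[i] == '[': brackets += 1 / if s[i] == ']': brackets -= 1"
-- (';' is neither, so checking ']' with else-if is the same)
def bupd (c : Char) (b : Int) : Int := if c = '[' then b + 1 else if c = ']' then b - 1 else b

-- Inner 'for i in range(pos, len(s))' loop of A, run on the suffix s[pos:], together with the
-- post-loop 'if s[i] != ';': i += 1' adjustment.  Returns (i - pos, brackets): the length of the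
-- record s[pos:i] and the bracket counter after the scan; the next pos is pos + (i - pos) + 1.
def erScan : List Char → Int → Nat × Int
  | [], b => (0, b)            -- unreachable: the while-guard 'pos < len(s)' gives a nonempty suffix
  | c :: rest, b =>
    if c = ';' ∧ bupd c b = 0 then (0, bupd c b)   -- break at the top-level ';'
    else
      match rest with
      | [] => (if c = ';' then 0 else 1, bupd c b) -- loop fell through: i = len-1, bumped unless s[i] = ';'
      | _ :: _ => ((erScan rest (bupd c b)).1 + 1, (erScan rest (bupd c b)).2)

-- The outer 'while pos < len(s)' loop of A: append s[pos:i].strip(), continue at pos = i + 1.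
-- (Indices are in-range naturals here, so Python's slice s[pos:i] is exactly take/drop.)
def erLoop (cs : List Char) (b : Int) : List (List Char) :=
  match cs with
  | [] => []
  | c :: rest =>
    PySem.Chars.strip ((c :: rest).take (erScan (c :: rest) b).1) ::
      erLoop ((c :: rest).drop ((erScan (c :: rest) b).1 + 1)) (erScan (c :: rest) b).2
termination_by cs.length
decreasing_by simp only [List.length_drop, List.length_cons]; omega

def extract_records (s : String) : List String :=
  (erLoop s.toList 0).map (fun r => String.ofList r)

-- ===== PORT B =====
-- the body of Source B's 'for ch in s' loop; state = (records, brackets, cur)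
def erbStep : List (List Char) × Int × List Char → Char → List (List Char) × Int × List Char
  | (recs, b, cur), c =>
    if c = '[' then (recs, b + 1, cur ++ [c])
    else if c = ']' then (recs, b - 1, cur ++ [c])
    else if c = ';' ∧ b = 0 then (recs ++ [PySem.Chars.strip cur], b, [])
    else (recs, b, cur ++ [c])

-- Source B's final 'if cur: records.append(''.join(cur).strip())'
def erbFinish : List (List Char) × Int × List Char → List (List Char)
  | (recs, _, cur) => if cur = [] then recs else recs ++ [PySem.Chars.strip cur]

def extract_records_alt (s : String) : List String :=
  (erbFinish (s.toList.foldl erbStep ([], 0, []))).map (fun r => String.ofList r)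

-- ===== PRECONDITION & SPEC =====
-- On strings ending in a semicolon at nonzero bracket depth A silently drops that final
-- semicolon from the last record (an artefact of its post-loop index bump), while B keeps
-- it, which is the natural flush of the remaining text.
-- bracket balance of a character list: +1 per '[', -1 per ']'
def bal (cs : List Char) : Int :=
  cs.foldr (fun c acc => (if c = '[' then 1 else if c = ']' then -1 else 0) + acc) 0

def D_extract_records (s : String) : Prop :=
  s.toList.getLast? = some ';' ∧ bal s.toList.dropLast ≠ 0
instance (s : String) : Decidable (D_extract_records s) := by
  unfold D_extract_records; infer_instance

def Spec_extract_records (s : String) (out : List String) : Prop :=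
  ¬ D_extract_records s → out = extract_records_alt s
instance (s : String) (out : List String) : Decidable (Spec_extract_records s out) := by
  unfold Spec_extract_records; infer_instance

def pvDiffWitness_extract_records : String := "[a;"
def pvDiffWitnessOut_extract_records : (List String) × (List String) := (["[a"], ["[a;"])

-- ===== CLAIM (what is proved, stated in full; the proofs are below) =====
def Claim_unchanged_extract_records : Prop :=
  ∀ (s : String), Dom_extract_records s → Spec_extract_records s (extract_records s)
def Claim_changed_extract_records : Prop :=
  Dom_extract_records (pvDiffWitness_extract_records) ∧
  D_extract_records (pvDiffWitness_extract_records) ∧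
  extract_records (pvDiffWitness_extract_records) = pvDiffWitnessOut_extract_records.1 ∧
  extract_records_alt (pvDiffWitness_extract_records) = pvDiffWitnessOut_extract_records.2 ∧
  pvDiffWitnessOut_extract_records.1 ≠ pvDiffWitnessOut_extract_records.2

-- ===== LEMMAS AND PROOFS =====

-- One-pass specification of A: Aseg cur cs b processes cs with bracket counter b while 'cur'
-- holds the characters of the current (unfinished) record; A's quirk appears in the nil case,
-- where a trailing ';' of the final record is dropped.
def trimSemi (cur : List Char) : List Char :=
  if cur.getLast? = some ';' then cur.dropLast else cur

def Aseg : List Char → List Char → Int → List (List Char)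
  | cur, [], _ => if cur = [] then [] else [PySem.Chars.strip (trimSemi cur)]
  | cur, c :: cs, b =>
    if c = ';' ∧ b = 0 then PySem.Chars.strip cur :: Aseg [] cs b
    else Aseg (cur ++ [c]) cs (bupd c b)

-- One-pass specification of B: identical recursion, plain flush at the end.
def Bseg : List Char → List Char → Int → List (List Char)
  | cur, [], _ => if cur = [] then [] else [PySem.Chars.strip cur]
  | cur, c :: cs, b =>
    if c = ';' ∧ b = 0 then PySem.Chars.strip cur :: Bseg [] cs b
    else Bseg (cur ++ [c]) cs (bupd c b)

lemma bal_nil : bal [] = 0 := rfl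

lemma bal_cons (c : Char) (cs : List Char) :
    bal (c :: cs) = (if c = '[' then 1 else if c = ']' then -1 else 0) + bal cs := rfl

lemma bupd_eq (c : Char) (b : Int) :
    bupd c b = b + (if c = '[' then 1 else if c = ']' then -1 else 0) := by
  simp only [bupd]; split_ifs <;> omega

-- controlled one-step equations
lemma erScan_break (c : Char) (rest : List Char) (b : Int) (h : c = ';' ∧ bupd c b = 0) :
    erScan (c :: rest) b = (0, bupd c b) := by
  rw [erScan.eq_def]; simp [if_pos h]

lemma erScan_last (c : Char) (b : Int) (h : ¬ (c = ';' ∧ bupd c b = 0)) :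
    erScan [c] b = (if c = ';' then 0 else 1, bupd c b) := by
  rw [erScan.eq_def]; simp [if_neg h]

lemma erScan_cons (c d : Char) (rest : List Char) (b : Int) (h : ¬ (c = ';' ∧ bupd c b = 0)) :
    erScan (c :: d :: rest) b =
      ((erScan (d :: rest) (bupd c b)).1 + 1, (erScan (d :: rest) (bupd c b)).2) := by
  rw [erScan.eq_def]; simp [if_neg h]

lemma erLoop_nil (b : Int) : erLoop [] b = [] := by
  rw [erLoop.eq_def]

lemma erLoop_cons (c : Char) (rest : List Char) (b : Int) :
    erLoop (c :: rest) b =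
      PySem.Chars.strip ((c :: rest).take (erScan (c :: rest) b).1) ::
        erLoop ((c :: rest).drop ((erScan (c :: rest) b).1 + 1)) (erScan (c :: rest) b).2 := by
  rw [erLoop.eq_def]

lemma aseg_split (cur : List Char) (c : Char) (cs : List Char) (b : Int) (h : c = ';' ∧ b = 0) :
    Aseg cur (c :: cs) b = PySem.Chars.strip cur :: Aseg [] cs b := by
  rw [Aseg.eq_def]; simp [if_pos h]

lemma aseg_step (cur : List Char) (c : Char) (cs : List Char) (b : Int) (h : ¬ (c = ';' ∧ b = 0)) :
    Aseg cur (c :: cs) b = Aseg (cur ++ [c]) cs (bupd c b) := by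
  rw [Aseg.eq_def]; simp [if_neg h]

lemma bseg_split (cur : List Char) (c : Char) (cs : List Char) (b : Int) (h : c = ';' ∧ b = 0) :
    Bseg cur (c :: cs) b = PySem.Chars.strip cur :: Bseg [] cs b := by
  rw [Bseg.eq_def]; simp [if_pos h]

lemma bseg_step (cur : List Char) (c : Char) (cs : List Char) (b : Int) (h : ¬ (c = ';' ∧ b = 0)) :
    Bseg cur (c :: cs) b = Bseg (cur ++ [c]) cs (bupd c b) := by
  rw [Bseg.eq_def]; simp [if_neg h]

lemma bupd_semi (b : Int) : bupd ';' b = b := by simp [bupd]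

-- B's fold computes Bseg.
lemma foldl_eq_bseg : ∀ (cs : List Char) (recs : List (List Char)) (b : Int) (cur : List Char),
    erbFinish (List.foldl erbStep (recs, b, cur) cs) = recs ++ Bseg cur cs b := by
  intro cs
  induction cs with
  | nil =>
    intro recs b cur
    rw [Bseg.eq_def]
    simp only [List.foldl_nil, erbFinish]
    split_ifs <;> simp
  | cons c cs ih =>
    intro recs b cur
    simp only [List.foldl_cons]
    by_cases h1 : c = '['
    · rw [show erbStep (recs, b, cur) c = (recs, b + 1, cur ++ [c]) from by simp [erbStep, h1],
          ih, bseg_step cur c cs b (by simp [h1]), h1]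
      simp [bupd]
    · by_cases h2 : c = ']'
      · rw [show erbStep (recs, b, cur) c = (recs, b - 1, cur ++ [c]) from by simp [erbStep, h1, h2],
            ih, bseg_step cur c cs b (by simp [h2]), h2]
        simp [bupd]
      · by_cases h3 : c = ';' ∧ b = 0
        · rw [show erbStep (recs, b, cur) c = (recs ++ [PySem.Chars.strip cur], b, []) from by
                simp [erbStep, h1, h2, h3],
              ih, bseg_split cur c cs b h3]
          simp
        · rw [show erbStep (recs, b, cur) c = (recs, b, cur ++ [c]) from by
                simp [erbStep, h1, h2, h3],
              ih, bseg_step cur c cs b h3]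
          have : bupd c b = b := by simp [bupd, h1, h2]
          rw [this]

-- A's inner scan, seen through Aseg: one record ends at offset L = (erScan cs b).1; the rest of
-- the string (if any) continues with counter (erScan cs b).2 and an empty current record.
lemma aseg_scan (cs : List Char) : ∀ (b : Int) (cur : List Char), cs ≠ [] →
    Aseg cur cs b =
      if (erScan cs b).1 + 1 ≤ cs.length then
        PySem.Chars.strip (cur ++ cs.take (erScan cs b).1) ::
          Aseg [] (cs.drop ((erScan cs b).1 + 1)) (erScan cs b).2
      else [PySem.Chars.strip (cur ++ cs.take (erScan cs b).1)] := by
  induction cs with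
  | nil => intro b cur h; exact absurd rfl h
  | cons c rest ih =>
    intro b cur _
    by_cases hbr : c = ';' ∧ bupd c b = 0
    · have hb0 : b = 0 := by have := hbr.2; rwa [hbr.1, bupd_semi] at this
      rw [erScan_break c rest b hbr, aseg_split cur c rest b ⟨hbr.1, hb0⟩, hbr.1, bupd_semi]
      simp
    · have hstep : ¬ (c = ';' ∧ b = 0) := by
        intro h; exact hbr ⟨h.1, by rw [h.1, bupd_semi, h.2]⟩
      rw [aseg_step cur c rest b hstep]
      cases rest with
      | nil =>
        rw [erScan_last c b hbr]
        by_cases hc : c = ';'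
        · subst hc
          have ht : trimSemi (cur ++ [';']) = cur := by
            simp [trimSemi, List.getLast?_concat]
          rw [Aseg.eq_def]
          simp [ht, Aseg]
        · have : trimSemi (cur ++ [c]) = cur ++ [c] := by
            simp [trimSemi, List.getLast?_concat, hc]
          rw [Aseg.eq_def]
          simp [hc, this]
      | cons d rest' =>
        rw [erScan_cons c d rest' b hbr, ih (bupd c b) (cur ++ [c]) (by simp)]
        simp only [List.length_cons, List.take_succ_cons, List.drop_succ_cons,
                   List.append_assoc, List.singleton_append]
        split_ifs with g1 g2
        · rfl
        · omega
        · omega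
        · rfl

-- A's nested loops compute Aseg with an empty current record.
lemma erLoop_eq_aseg : ∀ (n : Nat) (cs : List Char), cs.length ≤ n → ∀ b, erLoop cs b = Aseg [] cs b := by
  intro n
  induction n with
  | zero =>
    intro cs h b
    have : cs = [] := List.eq_nil_of_length_eq_zero (Nat.le_zero.mp h)
    subst this
    rw [erLoop_nil, Aseg.eq_def]
    simp
  | succ n ih =>
    intro cs h b
    cases cs with
    | nil => rw [erLoop_nil, Aseg.eq_def]; simp
    | cons c rest =>
      rw [erLoop_cons, aseg_scan (c :: rest) b [] (by simp)]
      simp only [List.nil_append]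
      split_ifs with h1
      · have hlen : ((c :: rest).drop ((erScan (c :: rest) b).1 + 1)).length ≤ n := by
          simp only [List.length_drop, List.length_cons] at *
          omega
        rw [ih _ hlen]
      · have hdrop : (c :: rest).drop ((erScan (c :: rest) b).1 + 1) = [] := by
          apply List.drop_eq_nil_of_le
          simp only [List.length_cons] at *
          omega
        rw [hdrop, erLoop_nil]

-- Outside the difference region the two one-pass specs agree: the final record never ends in a
-- ';' taken at nonzero depth, so trimSemi is the identity on it.
lemma aseg_eq_bseg : ∀ (cs : List Char) (b : Int) (cur : List Char),
    (cs = [] → cur.getLast? ≠ some ';') →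
    (cs.getLast? = some ';' → b + bal cs.dropLast = 0) →
    Aseg cur cs b = Bseg cur cs b := by
  intro cs
  induction cs with
  | nil =>
    intro b cur h1 _
    rw [Aseg.eq_def, Bseg.eq_def]
    have : trimSemi cur = cur := by simp [trimSemi, h1 rfl]
    simp [this]
  | cons c cs ih =>
    intro b cur _ h2
    by_cases h : c = ';' ∧ b = 0
    · rw [aseg_split cur c cs b h, bseg_split cur c cs b h]
      congr 1
      apply ih
      · intro _; simp
      · intro hl
        cases cs with
        | nil => simp at hl
        | cons d t =>
          have := h2 (by simpa using hl)
          rw [List.dropLast_cons_of_ne_nil (by simp), bal_cons, h.1] at this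
          simpa using this
    · rw [aseg_step cur c cs b h, bseg_step cur c cs b h]
      apply ih
      · intro hnil
        subst hnil
        simp only [List.getLast?_concat]
        intro hc
        have hc' : c = ';' := by simpa using hc
        have := h2 (by simp [hc'])
        simp [bal_nil] at this
        exact h ⟨hc', this⟩
      · intro hl
        cases cs with
        | nil => simp at hl
        | cons d t =>
          have := h2 (by simpa using hl)
          rw [List.dropLast_cons_of_ne_nil (by simp), bal_cons] at this
          rw [bupd_eq]
          omega

-- ===== VERDICT (by name: the statements are the Claim_ definitions above) =====
theorem extract_records_spec : Claim_unchanged_extract_records := by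
  intro s _ hD
  unfold extract_records extract_records_alt
  rw [foldl_eq_bseg s.toList [] 0 [], erLoop_eq_aseg s.toList.length s.toList le_rfl 0]
  rw [aseg_eq_bseg s.toList 0 []]
  · simp
  · intro _; simp
  · intro hl
    by_contra hne
    exact hD ⟨hl, by omega⟩

theorem extract_records_changed : Claim_changed_extract_records := by
  unfold Claim_changed_extract_records
  refine ⟨by decide, by decide, ?_, by decide, by decide⟩
  unfold extract_records
  rw [erLoop_eq_aseg pvDiffWitness_extract_records.toList.length _ le_rfl 0]
  decide
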